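-- pv_equiv track=rewrite | github.com/NLPWM-WHU/CCG | code/relation_expansion/relation_expansion.py | obtain_step_permutations
-- ===== SOURCE A (Python) =====
-- def obtain_step_permutations(current_step, entity1_step_ceiling, entity2_step_ceiling):
--     step_permutations = []
--
--     entity1_allowed_step_ceiling = min(current_step, entity1_step_ceiling)
--     entity2_allowed_step_ceiling = min(current_step, entity2_step_ceiling)
--
--     for entity1_step in range(entity1_allowed_step_ceiling + 1):
--         for entity2_step in range(entity2_allowed_step_ceiling + 1):
--             if entity1_step + entity2_step == current_step:
--                 step_permutations.append([entity1_step, entity2_step])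
--
--     return step_permutations
-- ===== SOURCE B (Python) =====
-- def obtain_step_permutations(current_step, entity1_step_ceiling, entity2_step_ceiling):
--     lo = max(0, current_step - entity2_step_ceiling)
--     hi = min(current_step, entity1_step_ceiling)
--     return [[i, current_step - i] for i in range(lo, hi + 1)]
-- ===== Notes on version B (the rewrite author's own statement) =====
-- stated objective: faster
-- what changed: Replaced the O(n^2) nested scan over all (entity1_step, entity2_step) pairs by a closed-form range [max(0, current_step - entity2_step_ceiling), min(current_step, entity1_step_ceiling)] over entity1_step alone, emitting [i, current_step - i] directly.
import Mathlib
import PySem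

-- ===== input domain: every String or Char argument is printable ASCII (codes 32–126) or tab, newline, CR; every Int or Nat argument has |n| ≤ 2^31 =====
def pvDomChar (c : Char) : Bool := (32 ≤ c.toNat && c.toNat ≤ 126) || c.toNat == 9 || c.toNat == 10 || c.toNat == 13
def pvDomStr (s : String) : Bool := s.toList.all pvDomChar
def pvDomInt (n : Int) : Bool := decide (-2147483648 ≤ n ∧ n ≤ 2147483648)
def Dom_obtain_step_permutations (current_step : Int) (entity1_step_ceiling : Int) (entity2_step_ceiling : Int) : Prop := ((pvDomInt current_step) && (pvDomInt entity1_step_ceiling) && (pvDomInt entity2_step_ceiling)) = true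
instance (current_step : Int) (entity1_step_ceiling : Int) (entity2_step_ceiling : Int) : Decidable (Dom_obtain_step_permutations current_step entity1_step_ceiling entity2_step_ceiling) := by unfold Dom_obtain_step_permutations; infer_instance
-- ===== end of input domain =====

-- B replaces A's quadratic nested scan by a closed-form range over entity1_step alone (faster, asymptotic).

-- ===== PORT A =====
def obtain_step_permutations (current_step : Int) (entity1_step_ceiling : Int) (entity2_step_ceiling : Int) : List (List Int) :=
  let entity1_allowed_step_ceiling := min current_step entity1_step_ceiling
  let entity2_allowed_step_ceiling := min current_step entity2_step_ceiling
  (PySem.List.pyRange 0 (entity1_allowed_step_ceiling + 1) 1).foldl (fun acc entity1_step =>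
    (PySem.List.pyRange 0 (entity2_allowed_step_ceiling + 1) 1).foldl (fun acc2 entity2_step =>
      if entity1_step + entity2_step = current_step then acc2 ++ [[entity1_step, entity2_step]] else acc2) acc) []

-- ===== PORT B =====
def obtain_step_permutations_alt (current_step : Int) (entity1_step_ceiling : Int) (entity2_step_ceiling : Int) : List (List Int) :=
  let lo := max 0 (current_step - entity2_step_ceiling)
  let hi := min current_step entity1_step_ceiling
  (PySem.List.pyRange lo (hi + 1) 1).map (fun i => [i, current_step - i])

-- ===== PRECONDITION & SPEC =====
def Spec_obtain_step_permutations (current_step : Int) (entity1_step_ceiling : Int) (entity2_step_ceiling : Int) (out : List (List Int)) : Prop := out = obtain_step_permutations_alt current_step entity1_step_ceiling entity2_step_ceiling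
instance (current_step : Int) (entity1_step_ceiling : Int) (entity2_step_ceiling : Int) (out : List (List Int)) : Decidable (Spec_obtain_step_permutations current_step entity1_step_ceiling entity2_step_ceiling out) := by unfold Spec_obtain_step_permutations; infer_instance

-- ===== CLAIM (what is proved, stated in full; the proofs are below) =====
def Claim_equal_obtain_step_permutations : Prop := ∀ (current_step : Int) (entity1_step_ceiling : Int) (entity2_step_ceiling : Int), Dom_obtain_step_permutations current_step entity1_step_ceiling entity2_step_ceiling → Spec_obtain_step_permutations current_step entity1_step_ceiling entity2_step_ceiling (obtain_step_permutations current_step entity1_step_ceiling entity2_step_ceiling)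

-- ===== LEMMAS AND PROOFS =====

-- filtering a unit-step range by "i + j = c" keeps at most the single value c - i
theorem pv_filter_range_eq (n : Nat) : ∀ (a i c : Int),
    (PySem.List.pyRange a (a + n) 1).filter (fun j => decide (i + j = c)) =
      if a ≤ c - i ∧ c - i < a + n then [c - i] else [] := by
  induction n with
  | zero =>
    intro a i c
    rw [PySem.List.pyRange_one_eq_nil (by omega)]
    simp only [List.filter_nil]
    split_ifs with h
    · omega
    · rfl
  | succ n ih =>
    intro a i c
    have hsplit : a + (↑(n + 1) : Int) = (a + n) + 1 := by push_cast; ring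
    rw [hsplit, PySem.List.pyRange_one_succ_right (by omega), List.filter_append, ih]
    simp only [List.filter_cons, List.filter_nil]
    split_ifs with h1 h2 h2 <;> simp_all <;> omega

theorem pv_flatMap_nil {α β : Type} (f : α → List β) (l : List α)
    (h : ∀ x ∈ l, f x = []) : l.flatMap f = [] := by
  induction l with
  | nil => rfl
  | cons x t ih =>
    simp only [List.flatMap_cons, h x (by simp), List.nil_append]
    exact ih (fun y hy => h y (by simp [hy]))

theorem pv_flatMap_singleton {α β : Type} (f : α → List β) (g : α → β) (l : List α)
    (h : ∀ x ∈ l, f x = [g x]) : l.flatMap f = l.map g := by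
  induction l with
  | nil => rfl
  | cons x t ih =>
    simp only [List.flatMap_cons, h x (by simp), List.map_cons, List.singleton_append]
    exact congrArg _ (ih (fun y hy => h y (by simp [hy])))

-- ===== VERDICT (by name: the statement is the Claim_ definition above) =====
theorem obtain_step_permutations_spec : Claim_equal_obtain_step_permutations := by
  intro c e1 e2 _
  unfold Spec_obtain_step_permutations obtain_step_permutations obtain_step_permutations_alt
  simp only
  set a1 := min c e1 with ha1
  set a2 := min c e2 with ha2
  set lo := max 0 (c - e2) with hlo
  -- inner loop: append-if over a range is a filter-and-map
  have hinner : ∀ (i : Int) (acc : List (List Int)),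
      (PySem.List.pyRange 0 (a2 + 1) 1).foldl (fun acc2 j =>
        if i + j = c then acc2 ++ [[i, j]] else acc2) acc =
      acc ++ ((PySem.List.pyRange 0 (a2 + 1) 1).filter (fun j => decide (i + j = c))).map
        (fun j => [i, j]) := by
    intro i acc
    exact PySem.List.foldl_append_ite (p := fun j => i + j = c) (f := fun j => [i, j]) _ _
  simp only [hinner]
  rw [PySem.List.foldl_append_eq_flatMap]
  simp only [List.nil_append]
  -- evaluate each inner filter to an if
  have hfilt : ∀ i : Int,
      ((PySem.List.pyRange 0 (a2 + 1) 1).filter (fun j => decide (i + j = c))).map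
        (fun j => [i, j]) =
      if 0 ≤ c - i ∧ c - i < a2 + 1 then [[i, c - i]] else [] := by
    intro i
    by_cases hneg : 0 ≤ a2 + 1
    · have : (PySem.List.pyRange 0 (a2 + 1) 1) = PySem.List.pyRange 0 (0 + ((a2 + 1).toNat : Int)) 1 := by
        congr 1; omega
      rw [this, pv_filter_range_eq]
      have hcast : (0 : Int) + ((a2 + 1).toNat : Int) = a2 + 1 := by omega
      rw [hcast]
      split_ifs with h
      · rfl
      · rfl
    · rw [PySem.List.pyRange_one_eq_nil (by omega)]
      simp only [List.filter_nil, List.map_nil]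
      split_ifs with h
      · omega
      · rfl
  simp only [hfilt]
  by_cases hle : lo ≤ a1
  · -- non-empty answer range: split A's outer range at lo; left part contributes nothing
    rw [PySem.List.pyRange_one_append 0 lo (a1 + 1) (by omega) (by omega), List.flatMap_append]
    rw [pv_flatMap_nil _ _ (by
      intro x hx
      rw [PySem.List.mem_pyRange_one] at hx
      split_ifs with h
      · omega
      · rfl)]
    rw [List.nil_append]
    exact pv_flatMap_singleton _ _ _ (by
      intro x hx
      rw [PySem.List.mem_pyRange_one] at hx
      split_ifs with h
      · rfl
      · omega)
  · -- empty answer range: B is nil and every i in A's range fails the test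
    rw [PySem.List.pyRange_one_eq_nil (a := lo) (by omega), List.map_nil]
    exact pv_flatMap_nil _ _ (by
      intro x hx
      rw [PySem.List.mem_pyRange_one] at hx
      split_ifs with h
      · omega
      · rfl)
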